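-- pv_equiv track=rewrite | github.com/shuzeyfa/leetcode | C_Common_Divisors.py | dfs
-- ===== SOURCE A (Python) =====
-- s="1009998"
--
-- def dfs(val,index):
--     if index == len(s):
--         return True
--
--     for j in range(index,len(s)):
--         val2 = int(s[index:j+1])
--         if val2 + 1 == val and dfs(val2,j+1):
--             return True
--     return False
-- ===== SOURCE B (Python) =====
-- s = "1009998"
--
-- def dfs(val, index):
--     # Iterative DFS: explicit worklist of (value, position) states instead of recursion.
--     stack = [(val, index)]
--     n = len(s)
--     while stack:
--         v, i = stack.pop()
--         if i == n:
--             return True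
--         for j in range(i, n):
--             v2 = int(s[i:j + 1])
--             if v2 + 1 == v:
--                 stack.append((v2, j + 1))
--     return False
-- ===== Notes on version B (the rewrite author's own statement) =====
-- stated objective: alternative
-- what changed: Replaces A's recursive backtracking with an iterative DFS over an explicit stack of (value, position) states, popping states and pushing the matching continuations until index == len(s) is reached or the worklist empties.
import Mathlib
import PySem

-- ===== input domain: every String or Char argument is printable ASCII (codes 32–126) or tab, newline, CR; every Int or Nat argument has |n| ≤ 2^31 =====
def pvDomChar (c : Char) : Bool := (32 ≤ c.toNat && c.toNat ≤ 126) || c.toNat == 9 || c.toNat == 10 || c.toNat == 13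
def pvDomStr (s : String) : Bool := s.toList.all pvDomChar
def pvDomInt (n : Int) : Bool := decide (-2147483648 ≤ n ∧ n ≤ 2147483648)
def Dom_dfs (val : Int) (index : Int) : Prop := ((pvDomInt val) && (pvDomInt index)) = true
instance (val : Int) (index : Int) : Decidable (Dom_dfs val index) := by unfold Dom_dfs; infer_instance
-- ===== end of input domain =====

-- B replaces A's recursion by an explicit stack/worklist of (value, position) states (different
-- decomposition, same cost); equivalence of the RETURN values is proved on Pre_ (0 ≤ index).

-- the module-level string s = "1009998"
def pvS : String := "1009998"

-- int(s[i:j+1]); under Pre_ (0 ≤ i ≤ j < len(s)) the slice is a nonempty digit string, so the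
-- parse never fails; .getD 0 never fires on admitted inputs (Python raises outside Pre_).
def pvParse (i j : Int) : Int :=
  (PySem.Int.ofStr? (PySem.Str.slice pvS (some i) (some (j + 1)))).getD 0

-- ===== PORT A =====
-- literal port of A: test index == len(s), else for j in range(index, len(s)) try the
-- substring value and recurse; early-return True ≙ List.any.  The Nat fuel only makes the
-- recursion total: on Pre_ (0 ≤ index) the index strictly increases toward len(s) = 7 at each
-- nested call, so the depth never exceeds 8 and the fuel is never exhausted.
def dfsGo : Nat → Int → Int → Bool
  | 0, _, _ => false
  | Nat.succ n, val, index =>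
    if index = PySem.Str.len pvS then true
    else
      (PySem.List.pyRange index (PySem.Str.len pvS) 1).any (fun j =>
        let val2 := pvParse index j
        (val2 + 1 == val) && dfsGo n val2 (j + 1))

def dfs (val : Int) (index : Int) : Bool := dfsGo 8 val index

-- ===== PORT B =====
-- the states pushed while scanning j in range(i, len(s)); Python appends in j order and pops
-- from the end, so head-of-list = top-of-stack means the pushes are consed (reversed) in front.
def pvChildren (v i : Int) : List (Int × Int) :=
  (PySem.List.pyRange i (PySem.Str.len pvS) 1).foldl
    (fun acc j =>
      let v2 := pvParse i j
      if v2 + 1 == v then (v2, j + 1) :: acc else acc) []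

-- potential of one state / of the whole stack: it strictly decreases at every iteration of B's
-- while loop, so it is a fuel bound that the loop never exhausts.
def pvPot (i : Int) : Nat := 2 ^ ((8 - i).toNat)

def pvMeasure (st : List (Int × Int)) : Nat := (st.map (fun p => pvPot p.2)).sum

-- literal port of B's while loop: pop a state, succeed at index == len(s), otherwise push the
-- children states and continue; the loop ends with False when the stack empties.  The fuel
-- (the initial stack's potential) only makes the loop total; it is never exhausted.
def loopGo : Nat → List (Int × Int) → Bool
  | _, [] => false
  | 0, _ :: _ => false
  | Nat.succ n, (v, i) :: rest =>
    if i = PySem.Str.len pvS then true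
    else loopGo n (pvChildren v i ++ rest)

def dfs_alt (val : Int) (index : Int) : Bool :=
  loopGo (pvMeasure [(val, index)]) [(val, index)]

-- ===== PRECONDITION & SPEC =====
-- Pre_ excludes index < 0: there Python slices like s[index:0] are empty and int('') raises
-- ValueError (every call with a negative index ends in such a raise), so A never returns.
def Pre_dfs (val : Int) (index : Int) : Prop := 0 ≤ index
instance (val : Int) (index : Int) : Decidable (Pre_dfs val index) := by unfold Pre_dfs; infer_instance

def pvWitness_dfs : Int × Int := (9, 6)

def Spec_dfs (val : Int) (index : Int) (out : Bool) : Prop := out = dfs_alt val index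
instance (val : Int) (index : Int) (out : Bool) : Decidable (Spec_dfs val index out) := by
  unfold Spec_dfs; infer_instance

-- ===== CLAIM (what is proved, stated in full; the proofs are below) =====
def Claim_equal_dfs : Prop :=
  ∀ (val : Int) (index : Int), Dom_dfs val index → Pre_dfs val index →
    Spec_dfs val index (dfs val index)

-- ===== LEMMAS AND PROOFS =====

lemma pv_len_eq : PySem.Str.len pvS = 7 := by decide

lemma dfsGo_succ (n : Nat) (v i : Int) :
    dfsGo (n + 1) v i =
      if i = PySem.Str.len pvS then true
      else
        (PySem.List.pyRange i (PySem.Str.len pvS) 1).any (fun j =>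
          let val2 := pvParse i j
          (val2 + 1 == v) && dfsGo n val2 (j + 1)) := rfl

lemma loopGo_nil (n : Nat) : loopGo n [] = false := by cases n <;> rfl

lemma loopGo_succ (n : Nat) (v i : Int) (rest : List (Int × Int)) :
    loopGo (n + 1) ((v, i) :: rest) =
      if i = PySem.Str.len pvS then true
      else loopGo n (pvChildren v i ++ rest) := rfl

lemma pvAnyCongr {α : Type} (l : List α) (f g : α → Bool)
    (h : ∀ a ∈ l, f a = g a) : l.any f = l.any g := by
  induction l with
  | nil => rfl
  | cons a l ih =>
    simp only [List.any_cons, h a List.mem_cons_self,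
      ih (fun b hb => h b (List.mem_cons_of_mem _ hb))]

lemma pvMeasure_append (a b : List (Int × Int)) :
    pvMeasure (a ++ b) = pvMeasure a + pvMeasure b := by
  simp [pvMeasure]

lemma pvMeasure_foldl_le (v i : Int) (l : List Int) (acc : List (Int × Int)) :
    pvMeasure (l.foldl
      (fun acc j =>
        let v2 := pvParse i j
        if v2 + 1 == v then (v2, j + 1) :: acc else acc) acc)
      ≤ pvMeasure acc + (l.map (fun j => 2 ^ ((7 - j).toNat))).sum := by
  induction l generalizing acc with
  | nil => simp
  | cons j l ih =>
    refine le_trans (ih _) ?_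
    have h2 : pvPot (j + 1) = 2 ^ ((7 - j).toNat) := by
      have : (8 - (j + 1)).toNat = (7 - j).toNat := by omega
      simp [pvPot, this]
    by_cases hc : pvParse i j + 1 == v <;>
      simp [hc, pvMeasure, h2] <;> omega

-- Σ_{j ∈ range(i,7)} 2^(7-j) + 2 ≤ 2^(8-i) for i ≤ 7 (geometric sum)
lemma pvGeom : ∀ (n : Nat) (i : Int), i ≤ 7 → (7 - i).toNat = n →
    ((PySem.List.pyRange i 7 1).map (fun j => (2:Nat) ^ ((7 - j).toNat))).sum + 2
      ≤ 2 ^ ((8 - i).toNat) := by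
  intro n
  induction n with
  | zero =>
    intro i h1 h2
    have hi : i = 7 := by omega
    subst hi
    rw [PySem.List.pyRange_one_eq_nil (by omega)]
    decide
  | succ n ih =>
    intro i h1 h2
    have hlt : i < 7 := by omega
    rw [PySem.List.pyRange_one_cons hlt]
    have hih := ih (i + 1) (by omega) (by omega)
    have he : (8 - (i + 1)).toNat = (7 - i).toNat := by omega
    rw [he] at hih
    have he2 : (8 - i).toNat = (7 - i).toNat + 1 := by omega
    rw [he2, pow_succ]
    simp only [List.map_cons, List.sum_cons]
    omega

lemma pvChildren_lt (v i : Int) : pvMeasure (pvChildren v i) < pvPot i := by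
  unfold pvChildren
  rw [pv_len_eq]
  have h1 := pvMeasure_foldl_le v i (PySem.List.pyRange i 7 1) []
  have h0 : pvMeasure ([] : List (Int × Int)) = 0 := by simp [pvMeasure]
  rw [h0, Nat.zero_add] at h1
  by_cases h : i ≤ 7
  · have h2 := pvGeom ((7 - i).toNat) i h rfl
    unfold pvPot
    omega
  · rw [PySem.List.pyRange_one_eq_nil (by omega)]
    simp only [List.foldl_nil]
    have h3 : 1 ≤ pvPot i := Nat.one_le_two_pow
    omega

lemma pvStep_lt (v i : Int) (rest : List (Int × Int)) :
    pvMeasure (pvChildren v i ++ rest) < pvMeasure ((v, i) :: rest) := by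
  rw [pvMeasure_append]
  have := pvChildren_lt v i
  simp only [pvMeasure, List.map_cons, List.sum_cons] at *
  omega

-- enough fuel is as good as any more fuel (on nonnegative indices)
lemma dfsGo_stable : ∀ (n : Nat) (m : Nat) (v i : Int), 0 ≤ i →
    (8 - i).toNat ≤ n → (8 - i).toNat ≤ m → dfsGo n v i = dfsGo m v i := by
  intro n
  induction n with
  | zero =>
    intro m v i _ hn _
    have hi : 8 ≤ i := by omega
    have h7 : ¬ i = (7 : Int) := by omega
    cases m with
    | zero => rfl
    | succ m =>
      have hne : ¬ i = PySem.Str.len pvS := by rw [pv_len_eq]; omega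
      have hnil : PySem.List.pyRange i (PySem.Str.len pvS) 1 = [] := by
        rw [pv_len_eq]; exact PySem.List.pyRange_one_eq_nil (by omega)
      rw [dfsGo_succ, if_neg hne, hnil]
      simp [dfsGo]
  | succ n ih =>
    intro m v i hi hn hm
    cases m with
    | zero =>
      have hi8 : 8 ≤ i := by omega
      have hne : ¬ i = PySem.Str.len pvS := by rw [pv_len_eq]; omega
      have hnil : PySem.List.pyRange i (PySem.Str.len pvS) 1 = [] := by
        rw [pv_len_eq]; exact PySem.List.pyRange_one_eq_nil (by omega)
      rw [dfsGo_succ, if_neg hne, hnil]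
      simp [dfsGo]
    | succ m =>
      rw [dfsGo_succ, dfsGo_succ]
      by_cases h7 : i = PySem.Str.len pvS
      · rw [if_pos h7, if_pos h7]
      · rw [if_neg h7, if_neg h7]
        refine pvAnyCongr _ _ _ ?_
        intro j hj
        rw [pv_len_eq] at hj h7
        have hjb := PySem.List.mem_pyRange_one.1 hj
        have hst := ih m (pvParse i j) (j + 1) (by omega) (by omega) (by omega)
        simp only [hst]

-- one unfolding of A at a nonnegative, non-final index
lemma dfs_unfold (v i : Int) (hi : 0 ≤ i) (h : ¬ i = PySem.Str.len pvS) :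
    dfs v i = (PySem.List.pyRange i (PySem.Str.len pvS) 1).any
      (fun j => (pvParse i j + 1 == v) && dfs (pvParse i j) (j + 1)) := by
  have h8 := dfsGo_succ 7 v i
  rw [if_neg h] at h8
  rw [show dfs v i = dfsGo (7 + 1) v i from rfl, h8]
  refine pvAnyCongr _ _ _ ?_
  intro j hj
  rw [pv_len_eq] at hj
  have hjb := PySem.List.mem_pyRange_one.1 hj
  have hst := dfsGo_stable 7 8 (pvParse i j) (j + 1) (by omega)
    (by omega) (by omega)
  simp only [hst]
  rfl

-- membership in the pushed children
lemma pvChildren_mem_foldl (v i : Int) :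
    ∀ (l : List Int) (acc : List (Int × Int)) (p : Int × Int),
      p ∈ l.foldl (fun acc j =>
        let v2 := pvParse i j
        if v2 + 1 == v then (v2, j + 1) :: acc else acc) acc →
      p ∈ acc ∨ ∃ j ∈ l, p = (pvParse i j, j + 1) := by
  intro l
  induction l with
  | nil => intro acc p h; exact Or.inl h
  | cons j l ih =>
    intro acc p h
    rcases ih _ p h with h' | ⟨j', hj', hp⟩
    · by_cases hc : pvParse i j + 1 == v
      · simp only [hc, if_pos] at h'
        rcases List.mem_cons.1 h' with h'' | h''
        · exact Or.inr ⟨j, List.mem_cons_self, h''⟩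
        · exact Or.inl h''
      · have hc' : (pvParse i j + 1 == v) = false := by simpa using hc
        simp only [hc', Bool.false_eq_true, if_false] at h'
        exact Or.inl h'
    · exact Or.inr ⟨j', List.mem_cons_of_mem _ hj', hp⟩

lemma pvChildren_nonneg (v i : Int) (hi : 0 ≤ i) :
    ∀ p ∈ pvChildren v i, 0 ≤ p.2 := by
  intro p hp
  rcases pvChildren_mem_foldl v i _ [] p hp with h | ⟨j, hj, hp'⟩
  · simp at h
  · have := PySem.List.mem_pyRange_one.1 hj
    subst hp'
    simp only
    omega

-- the pushed states carry exactly the successful branch tests of A's loop body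
lemma any_children_foldl (v i : Int) (P : Int × Int → Bool) :
    ∀ (l : List Int) (acc : List (Int × Int)),
      ((l.foldl (fun acc j =>
          let v2 := pvParse i j
          if v2 + 1 == v then (v2, j + 1) :: acc else acc) acc).any P)
        = (l.any (fun j => (pvParse i j + 1 == v) && P (pvParse i j, j + 1)) || acc.any P) := by
  intro l
  induction l with
  | nil => simp
  | cons j l ih =>
    intro acc
    simp only [List.foldl_cons, List.any_cons]
    rw [ih]
    by_cases hc : pvParse i j + 1 == v <;>
      simp [hc, Bool.or_comm, Bool.or_assoc]

lemma any_children (v i : Int) (P : Int × Int → Bool) :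
    (pvChildren v i).any P
      = (PySem.List.pyRange i (PySem.Str.len pvS) 1).any
          (fun j => (pvParse i j + 1 == v) && P (pvParse i j, j + 1)) := by
  unfold pvChildren
  rw [any_children_foldl]
  simp

-- the worklist loop decides: some state on the stack succeeds under A
lemma loopGo_eq_any : ∀ (n : Nat) (st : List (Int × Int)), pvMeasure st ≤ n →
    (∀ p ∈ st, 0 ≤ p.2) →
    loopGo n st = st.any (fun p => dfs p.1 p.2) := by
  intro n
  induction n with
  | zero =>
    intro st hst _
    cases st with
    | nil => simp [loopGo_nil]
    | cons p rest =>
      exfalso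
      have : 1 ≤ pvPot p.2 := Nat.one_le_two_pow
      simp only [pvMeasure, List.map_cons, List.sum_cons] at hst
      omega
  | succ n ih =>
    intro st hst hnn
    cases st with
    | nil => simp [loopGo_nil]
    | cons p rest =>
      obtain ⟨v, i⟩ := p
      have hi : 0 ≤ i := hnn (v, i) List.mem_cons_self
      rw [loopGo_succ]
      by_cases h : i = PySem.Str.len pvS
      · have hd : dfs v i = true := by
          have h8 := dfsGo_succ 7 v i
          rw [if_pos h] at h8
          exact h8
        rw [if_pos h]
        simp [List.any_cons, hd]
      · have hlt := pvStep_lt v i rest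
        have hnn' : ∀ p ∈ pvChildren v i ++ rest, 0 ≤ p.2 := by
          intro p hp
          rcases List.mem_append.1 hp with hp | hp
          · exact pvChildren_nonneg v i hi p hp
          · exact hnn p (List.mem_cons_of_mem _ hp)
        rw [if_neg h, ih _ (by omega) hnn']
        simp only [List.any_append, List.any_cons]
        rw [any_children, ← dfs_unfold v i hi h]

-- ===== VERDICT (by name: the statement is the Claim_ definition above) =====
theorem dfs_spec : Claim_equal_dfs := by
  intro val index _ hpre
  unfold Spec_dfs dfs_alt
  rw [loopGo_eq_any (pvMeasure [(val, index)]) _ le_rfl]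
  · simp
  · intro p hp
    simp only [List.mem_singleton] at hp
    subst hp
    exact hpre
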